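-- pv_equiv track=rewrite | github.com/pypi-data/pypi-mirror-285 | packages/like-laravel-db/like_laravel_db-0.1.1-py3-none-any.whl/like_laravel_db/db.py | escape_name
-- ===== SOURCE A (Python) =====
-- def check_field_need_escape(field_val):
--     ignore_list = ['as', 'count(', 'COUNT(']
--     return any(ignore_str in field_val for ignore_str in ignore_list)
--
-- def escape_name(field_val):
--     if check_field_need_escape(field_val):
--         return field_val
--     field_val = field_val.replace('`', '', -1)
--     sl = field_val.split('.')
--     nl = []
--     for s in sl:
--         nl.append('`%s`' % s)
--     return '.'.join(nl)
-- ===== SOURCE B (Python) =====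
-- def escape_name(field_val):
--     if any(s in field_val for s in ('as', 'count(', 'COUNT(')):
--         return field_val
--     field_val = field_val.replace('`', '')
--     return '`' + field_val.replace('.', '`.`') + '`'
-- ===== Notes on version B (the rewrite author's own statement) =====
-- stated objective: simpler
-- what changed: Replaces the split-on-dot / per-segment append loop / join pipeline with a single closed-form string build: wrap the whole name in backticks and replace each dot by a backtick-quoted dot via one str.replace.
import Mathlib
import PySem

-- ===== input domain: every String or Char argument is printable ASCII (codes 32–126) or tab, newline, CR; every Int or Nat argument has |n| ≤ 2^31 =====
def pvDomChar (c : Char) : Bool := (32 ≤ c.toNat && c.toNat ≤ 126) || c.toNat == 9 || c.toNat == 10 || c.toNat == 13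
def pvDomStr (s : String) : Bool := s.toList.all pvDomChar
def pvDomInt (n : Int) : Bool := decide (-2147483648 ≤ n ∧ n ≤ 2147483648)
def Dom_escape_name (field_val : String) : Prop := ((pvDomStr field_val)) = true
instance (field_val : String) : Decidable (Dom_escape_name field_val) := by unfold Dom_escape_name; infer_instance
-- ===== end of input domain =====

-- B replaces A's split / per-segment loop / join with one closed-form replace-and-wrap (simpler, same cost).

-- ===== PORT A =====
def check_field_need_escape (field_val : String) : Bool :=
  -- any(ignore_str in field_val for ignore_str in ['as', 'count(', 'COUNT('])
  ["as", "count(", "COUNT("].any (fun ignore_str => PySem.Str.isIn ignore_str field_val)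

def escape_name (field_val : String) : String :=
  if check_field_need_escape field_val then field_val
  else
    -- field_val = field_val.replace('`', '', -1)  (count -1 = replace all)
    let fv : List Char := PySem.Chars.replace field_val.toList ['`'] []
    -- sl = field_val.split('.')
    let sl : List (List Char) := PySem.Chars.splitOn fv ['.']
    -- nl = []; for s in sl: nl.append('`%s`' % s)
    let nl : List (List Char) := sl.foldl (fun acc s => acc ++ ['`' :: s ++ ['`']]) []
    -- return '.'.join(nl)
    String.ofList (PySem.Chars.join ['.'] nl)

-- ===== PORT B =====
def escape_name_alt (field_val : String) : String :=
  if ["as", "count(", "COUNT("].any (fun s => PySem.Str.isIn s field_val) then field_val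
  else
    let fv : List Char := PySem.Chars.replace field_val.toList ['`'] []
    String.ofList ('`' :: PySem.Chars.replace fv ['.'] ['`', '.', '`'] ++ ['`'])

-- ===== PRECONDITION & SPEC =====
def Spec_escape_name (field_val : String) (out : String) : Prop := out = escape_name_alt field_val
instance (field_val : String) (out : String) : Decidable (Spec_escape_name field_val out) := by unfold Spec_escape_name; infer_instance

-- ===== CLAIM (what is proved, stated in full; the proofs are below) =====
def Claim_equal_escape_name : Prop := ∀ (field_val : String), Dom_escape_name field_val → Spec_escape_name field_val (escape_name field_val)

-- ===== LEMMAS AND PROOFS =====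

-- pure recursive form of splitting on '.'
def pvSpl : List Char → List (List Char)
  | [] => [[]]
  | c :: t => if c = '.' then [] :: pvSpl t else (c :: (pvSpl t).headD []) :: (pvSpl t).tail

-- pure recursive form of replacing '.' by '`.`'
def pvRep : List Char → List Char
  | [] => []
  | c :: t => if c = '.' then '`' :: '.' :: '`' :: pvRep t else c :: pvRep t

theorem pvSpl_ne_nil (l : List Char) : pvSpl l ≠ [] := by
  cases l with
  | nil => simp [pvSpl]
  | cons c t => simp only [pvSpl]; split <;> simp

theorem pvSplitOn_go_eq (l : List Char) : ∀ (fuel : Nat) (cur : List Char) (acc : List (List Char)),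
    l.length ≤ fuel →
    PySem.Chars.splitOn.go ['.'] fuel l cur acc = acc.reverse ++ (pvSpl l).modifyHead (cur.reverse ++ ·) := by
  induction l with
  | nil =>
    intro fuel cur acc _
    cases fuel <;> simp [PySem.Chars.splitOn.go, pvSpl]
  | cons c t ih =>
    intro fuel cur acc hf
    cases fuel with
    | zero => simp at hf
    | succ f =>
      simp only [PySem.Chars.splitOn.go]
      by_cases hc : c = '.'
      · have hpre : List.isPrefixOf ['.'] (c :: t) = true := by
          simp [List.isPrefixOf, hc]
        rw [if_pos hpre]
        simp only [hc, List.length_cons] at hf ⊢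
        simp only [List.length_nil, List.drop_succ_cons, List.drop_zero]
        rw [ih f [] (cur.reverse :: acc) (by omega)]
        simp only [pvSpl, reduceIte, List.reverse_cons, List.append_assoc, List.singleton_append,
          List.modifyHead_cons]
        cases pvSpl t <;> simp
      · have hpre : List.isPrefixOf ['.'] (c :: t) = false := by
          simp [List.isPrefixOf]; intro h; exact absurd h.symm hc
        rw [if_neg (by simp [hpre])]
        simp only [List.length_cons] at hf
        rw [ih f (c :: cur) acc (by omega)]
        obtain ⟨h, tl, hsp⟩ : ∃ h tl, pvSpl t = h :: tl := by
          cases hsp : pvSpl t with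
          | nil => exact absurd hsp (pvSpl_ne_nil t)
          | cons h tl => exact ⟨h, tl, rfl⟩
        simp [pvSpl, hc, hsp]
  
theorem pvReplace_go_eq (l : List Char) : ∀ (fuel : Nat) (acc : List Char),
    l.length ≤ fuel →
    PySem.Chars.replace.go ['.'] ['`', '.', '`'] fuel l acc = acc.reverse ++ pvRep l := by
  induction l with
  | nil =>
    intro fuel acc _
    cases fuel <;> simp [PySem.Chars.replace.go, pvRep]
  | cons c t ih =>
    intro fuel acc hf
    cases fuel with
    | zero => simp at hf
    | succ f =>
      simp only [PySem.Chars.replace.go]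
      simp only [List.length_cons] at hf
      by_cases hc : c = '.'
      · have hpre : List.isPrefixOf ['.'] (c :: t) = true := by simp [List.isPrefixOf, hc]
        rw [if_pos hpre]
        simp only [List.length_cons, List.length_nil, List.drop_succ_cons, List.drop_zero]
        rw [ih f _ (by omega)]
        simp [pvRep, hc]
      · have hpre : List.isPrefixOf ['.'] (c :: t) = false := by
          simp [List.isPrefixOf]; intro h; exact absurd h.symm hc
        rw [if_neg (by simp [hpre])]
        rw [ih f _ (by omega)]
        simp [pvRep, hc]

-- joining the wrapped parts, unrolled
theorem pvJoin_wrap (tl : List (List Char)) (h : List Char) :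
    PySem.Chars.join ['.'] ((h :: tl).map (fun s => '`' :: s ++ ['`'])) =
      '`' :: h ++ ['`'] ++ tl.flatMap (fun s => '.' :: '`' :: s ++ ['`']) := by
  induction tl generalizing h with
  | nil => simp [PySem.Chars.join, List.intercalate]
  | cons x xs ih =>
    have step : ∀ (a b : List Char) (ys : List (List Char)),
        List.intercalate ['.'] (a :: b :: ys) = a ++ ['.'] ++ List.intercalate ['.'] (b :: ys) := by
      intro a b ys; simp [List.intercalate, List.intersperse]
    simp only [List.map_cons, PySem.Chars.join] at ih ⊢
    rw [step, ih]
    simp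

theorem pvJoin_spl_eq_rep (l : List Char) :
    PySem.Chars.join ['.'] ((pvSpl l).map (fun s => '`' :: s ++ ['`'])) =
      '`' :: pvRep l ++ ['`'] := by
  induction l with
  | nil => simp [pvSpl, pvRep, PySem.Chars.join, List.intercalate]
  | cons c t ih =>
    obtain ⟨h, tl, hsp⟩ : ∃ h tl, pvSpl t = h :: tl := by
      cases hsp : pvSpl t with
      | nil => exact absurd hsp (pvSpl_ne_nil t)
      | cons h tl => exact ⟨h, tl, rfl⟩
    rw [hsp, pvJoin_wrap] at ih
    have key : h ++ ['`'] ++ tl.flatMap (fun s => '.' :: '`' :: s ++ ['`']) = pvRep t ++ ['`'] := by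
      have := ih
      simp only [List.cons_append] at this
      exact List.cons.inj this |>.2
    by_cases hc : c = '.'
    · subst hc
      simp only [pvSpl, hsp, reduceIte]
      rw [pvJoin_wrap]
      simp only [pvRep, reduceIte]
      simp only [List.flatMap_cons]
      simp only [List.append_assoc, List.cons_append, List.nil_append] at key ⊢
      simp [key]
    · simp only [pvSpl, if_neg hc, hsp, List.headD_cons, List.tail_cons]
      rw [pvJoin_wrap]
      simp only [pvRep, if_neg hc]
      simp only [List.cons_append, List.append_assoc] at key ⊢
      simpa using key

-- ===== VERDICT (by name: the statement is the Claim_ definition above) =====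
theorem escape_name_spec : Claim_equal_escape_name := by
  intro field_val _
  unfold Spec_escape_name escape_name escape_name_alt check_field_need_escape
  split
  · rfl
  · simp only []
    set fv : List Char := PySem.Chars.replace field_val.toList ['`'] [] with hfv
    congr 1
    have hsplit : PySem.Chars.splitOn fv ['.'] = pvSpl fv := by
      rw [PySem.Chars.splitOn, pvSplitOn_go_eq fv (fv.length + 1) [] [] (by omega)]
      simp only [List.reverse_nil, List.nil_append]
      cases pvSpl fv <;> simp
    have hrep : PySem.Chars.replace fv ['.'] ['`', '.', '`'] = pvRep fv := by
      rw [PySem.Chars.replace]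
      rw [if_neg (by simp)]
      rw [pvReplace_go_eq fv fv.length [] (le_refl _)]
      simp
    rw [hsplit, hrep]
    rw [PySem.List.foldl_append_singleton_eq_map]
    exact pvJoin_spl_eq_rep fv
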